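-- pv_equiv track=rewrite | github.com/vanyamil/advent-of-code | 2015/5.py | repeating_pair
-- ===== SOURCE A (Python) =====
-- def repeating_pair(s):
-- 	bigrams = dict()
-- 	for i in range(len(s) - 1):
-- 		bigram = s[i:i+2]
-- 		if bigram not in bigrams:
-- 			bigrams[bigram] = i
-- 		elif i - bigrams[bigram] >= 2:
-- 			return True
-- 	return False
-- ===== SOURCE B (Python) =====
-- def repeating_pair(s):
-- 	return any(s[i:i+2] in s[i+2:] for i in range(len(s) - 1))
-- ===== Notes on version B (the rewrite author's own statement) =====
-- stated objective: idiomatic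
-- what changed: Replaced the first-occurrence dict pass (storing the index of each bigram and comparing distances) with the canonical one-liner that tests, for each i, whether the bigram s[i:i+2] occurs in the non-overlapping tail s[i+2:] via substring search.
import Mathlib
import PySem

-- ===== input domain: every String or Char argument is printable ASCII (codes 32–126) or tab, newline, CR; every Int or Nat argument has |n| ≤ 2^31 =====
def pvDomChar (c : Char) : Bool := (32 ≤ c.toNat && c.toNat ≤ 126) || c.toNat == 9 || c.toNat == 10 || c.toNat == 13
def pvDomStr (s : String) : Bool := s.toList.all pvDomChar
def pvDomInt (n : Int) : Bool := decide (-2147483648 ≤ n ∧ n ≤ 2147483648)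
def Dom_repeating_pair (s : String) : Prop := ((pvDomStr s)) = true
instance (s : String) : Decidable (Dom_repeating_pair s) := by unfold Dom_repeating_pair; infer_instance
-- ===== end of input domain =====

-- B replaces A's first-occurrence bigram dict with the idiomatic per-index substring test s[i:i+2] in s[i+2:].

-- ===== PORT A =====
-- loop 'for i in range(len(s)-1)' with early return, carrying the dict bigram -> first index
def repAuxA (t : List Char) : List Int → PySem.Dict (List Char) Int → Bool
  | [], _ => false
  | i :: rest, d =>
    let bigram := PySem.List.slice t (some i) (some (i + 2))
    match d.get? bigram with
    | none => repAuxA t rest (d.insert bigram i)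
    | some v => if 2 ≤ i - v then true else repAuxA t rest d

def repeating_pair (s : String) : Bool :=
  repAuxA s.toList (PySem.List.pyRange 0 ((PySem.Str.len s : Int) - 1) 1) PySem.Dict.empty

-- ===== PORT B =====
def repeating_pair_alt (s : String) : Bool :=
  (PySem.List.pyRange 0 ((PySem.Str.len s : Int) - 1) 1).any
    (fun i => PySem.Str.isIn (PySem.Str.slice s (some i) (some (i + 2)))
              (PySem.Str.slice s (some (i + 2)) none))

-- ===== PRECONDITION & SPEC =====
def Spec_repeating_pair (s : String) (out : Bool) : Prop := out = repeating_pair_alt s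
instance (s : String) (out : Bool) : Decidable (Spec_repeating_pair s out) := by unfold Spec_repeating_pair; infer_instance

-- ===== CLAIM (what is proved, stated in full; the proofs are below) =====
def Claim_equal_repeating_pair : Prop := ∀ (s : String), Dom_repeating_pair s → Spec_repeating_pair s (repeating_pair s)

-- ===== LEMMAS AND PROOFS =====

-- the bigram starting at index i
def pvBg (t : List Char) (i : Nat) : List Char := (t.drop i).take 2

-- the common characterisation: some bigram repeats at distance ≥ 2
def pvP (t : List Char) : Prop :=
  ∃ i j : Nat, i + 2 ≤ j ∧ j + 1 < t.length ∧ pvBg t i = pvBg t j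

lemma pvBg_len {t : List Char} {i : Nat} (h : i + 1 < t.length) :
    (pvBg t i).length = 2 := by
  simp [pvBg]; omega

lemma pvBg_len_lt {t : List Char} {i j : Nat} (h : i + 1 < t.length)
    (he : pvBg t i = pvBg t j) : j + 1 < t.length := by
  have h2 : (pvBg t j).length = 2 := by rw [← he]; exact pvBg_len h
  simp [pvBg] at h2; omega

lemma pvBg_prefix_drop {t : List Char} {k i : Nat} (hk : k + 1 < t.length) :
    pvBg t k <+: t.drop i ↔ pvBg t i = pvBg t k := by
  rw [List.prefix_iff_eq_take, pvBg_len hk]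
  exact ⟨fun h => h.symm, fun h => h.symm⟩

-- slice s[i:i+2] at a natural index is the bigram
lemma pvSlice_bg (t : List Char) (k : Nat) :
    PySem.List.slice t (some (k : Int)) (some ((k : Int) + 2)) = pvBg t k := by
  have : ((k : Int) + 2) = ((k : Int) + ((2 : Nat) : Int)) := by push_cast; ring
  rw [this, PySem.List.slice_natCast_add]; rfl

-- dict invariant: d maps each bigram to its FIRST occurrence among indices < m
def pvInv (t : List Char) (m : Nat) (d : PySem.Dict (List Char) Int) : Prop :=
  ∀ key : List Char,
    (∀ v, d.get? key = some v →
      ∃ i0 : Nat, v = (i0 : Int) ∧ i0 < m ∧ pvBg t i0 = key ∧ ∀ i < i0, pvBg t i ≠ key) ∧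
    (d.get? key = none → ∀ i < m, pvBg t i ≠ key)

def pvNoPair (t : List Char) (m : Nat) : Prop :=
  ∀ i j : Nat, i + 2 ≤ j → j < m → pvBg t i ≠ pvBg t j

lemma pvAuxA_iff (t : List Char) :
    ∀ (c m : Nat) (d : PySem.Dict (List Char) Int),
      pvInv t m d → pvNoPair t m →
      (repAuxA t ((List.range' m c).map Int.ofNat) d = true ↔
        ∃ i j : Nat, i + 2 ≤ j ∧ j < m + c ∧ pvBg t i = pvBg t j) := by
  intro c
  induction c with
  | zero =>
    intro m d _ hnp
    rw [List.range'_zero, List.map_nil]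
    constructor
    · intro h; exact absurd h (by simp [repAuxA])
    · rintro ⟨i, j, hij, hj, he⟩
      exact absurd he (hnp i j hij (by omega))
  | succ c ih =>
    intro m d hinv hnp
    rw [List.range'_succ, List.map_cons]
    show (match (PySem.Dict.get? d (PySem.List.slice t (some ((m : Nat) : Int)) (some (((m : Nat) : Int) + 2)))) with
      | none => repAuxA t ((List.range' (m+1) c).map Int.ofNat) (d.insert (PySem.List.slice t (some ((m : Nat) : Int)) (some (((m : Nat) : Int) + 2))) ((m : Nat) : Int))
      | some v => if 2 ≤ ((m : Nat) : Int) - v then true else repAuxA t ((List.range' (m+1) c).map Int.ofNat) d) = true ↔ _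
    rw [pvSlice_bg]
    rcases hg : d.get? (pvBg t m) with _ | v
    · -- not seen before: insert m as first occurrence
      have hfresh : ∀ i < m, pvBg t i ≠ pvBg t m := (hinv (pvBg t m)).2 hg
      have hinv' : pvInv t (m + 1) (d.insert (pvBg t m) (m : Int)) := by
        intro key
        by_cases hk : key = pvBg t m
        · subst hk
          constructor
          · intro v hv
            rw [PySem.Dict.get?_insert_self] at hv
            exact ⟨m, by simpa using hv.symm, by omega, rfl, hfresh⟩
          · intro hnone
            rw [PySem.Dict.get?_insert_self] at hnone; exact absurd hnone (by simp)
        · have hget : (d.insert (pvBg t m) (m : Int)).get? key = d.get? key := by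
            rw [PySem.Dict.get?_insert_of_ne]
            exact hk
          constructor
          · intro v hv
            rw [hget] at hv
            obtain ⟨i0, h1, h2, h3, h4⟩ := (hinv key).1 v hv
            exact ⟨i0, h1, by omega, h3, h4⟩
          · intro hnone i hi
            rw [hget] at hnone
            rcases Nat.lt_succ_iff_lt_or_eq.mp hi with h | h
            · exact (hinv key).2 hnone i h
            · subst h; exact fun he => hk he.symm
      have hnp' : pvNoPair t (m + 1) := by
        intro i j hij hj he
        rcases Nat.lt_succ_iff_lt_or_eq.mp hj with h | h
        · exact hnp i j hij h he
        · subst h; exact hfresh i (by omega) he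
      rw [ih (m + 1) _ hinv' hnp']
      constructor
      · rintro ⟨i, j, h1, h2, h3⟩; exact ⟨i, j, h1, by omega, h3⟩
      · rintro ⟨i, j, h1, h2, h3⟩; exact ⟨i, j, h1, by omega, h3⟩
    · -- seen: v is the first occurrence of this bigram
      obtain ⟨i0, hv, hi0m, hbg, hfirst⟩ := (hinv (pvBg t m)).1 v hg
      subst hv
      have hshow : (match (some ((i0 : Nat) : Int) : Option Int) with
          | none => repAuxA t ((List.range' (m+1) c).map Int.ofNat) (d.insert (pvBg t m) ((m : Nat) : Int))
          | some v => if 2 ≤ ((m : Nat) : Int) - v then true else repAuxA t ((List.range' (m+1) c).map Int.ofNat) d)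
          = (if 2 ≤ ((m : Nat) : Int) - ((i0 : Nat) : Int) then true else repAuxA t ((List.range' (m+1) c).map Int.ofNat) d) := rfl
      rw [hshow]
      by_cases htest : 2 ≤ (m : Int) - (i0 : Int)
      · rw [if_pos htest]
        constructor
        · intro _; exact ⟨i0, m, by omega, by omega, hbg⟩
        · intro _; rfl
      · rw [if_neg htest]
        have hnear : m ≤ i0 + 1 := by omega
        have hnp' : pvNoPair t (m + 1) := by
          intro i j hij hj he
          rcases Nat.lt_succ_iff_lt_or_eq.mp hj with h | h
          · exact hnp i j hij h he
          · subst h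
            -- first occurrence of pvBg t m is i0 ≥ m - 1, but i ≤ m - 2 shares it
            rcases Nat.lt_or_ge i i0 with hlt | hge
            · exact hfirst i hlt he
            · omega
        have hinv' : pvInv t (m + 1) d := by
          intro key
          constructor
          · intro w hw
            obtain ⟨j0, h1, h2, h3, h4⟩ := (hinv key).1 w hw
            exact ⟨j0, h1, by omega, h3, h4⟩
          · intro hnone i hi
            rcases Nat.lt_succ_iff_lt_or_eq.mp hi with h | h
            · exact (hinv key).2 hnone i h
            · subst h
              intro he
              rw [← he, hg] at hnone
              exact absurd hnone (by simp)
        rw [ih (m + 1) d hinv' hnp']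
        constructor
        · rintro ⟨i, j, h1, h2, h3⟩; exact ⟨i, j, h1, by omega, h3⟩
        · rintro ⟨i, j, h1, h2, h3⟩; exact ⟨i, j, h1, by omega, h3⟩

lemma pvRange_cast (n : Nat) :
    PySem.List.pyRange 0 ((n : Int) - 1) 1 = (List.range' 0 (n - 1)).map Int.ofNat := by
  rw [PySem.List.pyRange_one]
  have h1 : ((n : Int) - 1 - 0).toNat = n - 1 := by omega
  rw [h1, List.range_eq_range']
  exact List.map_congr_left (fun k _ => by simp)

lemma pvA_iff (s : String) : repeating_pair s = true ↔ pvP s.toList := by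
  unfold repeating_pair
  have hlen : (PySem.Str.len s : Int) = (s.toList.length : Int) := by
    simp [PySem.Str.len_eq]
  rw [hlen, pvRange_cast]
  have hinv0 : pvInv s.toList 0 PySem.Dict.empty := by
    intro key
    constructor
    · intro v hv; simp [PySem.Dict.get?, PySem.Dict.empty] at hv
    · intro _ i hi; omega
  have hnp0 : pvNoPair s.toList 0 := by intro i j _ hj; omega
  rw [pvAuxA_iff s.toList (s.toList.length - 1) 0 _ hinv0 hnp0]
  unfold pvP
  constructor
  · rintro ⟨i, j, h1, h2, h3⟩; exact ⟨i, j, h1, by omega, h3⟩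
  · rintro ⟨i, j, h1, h2, h3⟩; exact ⟨i, j, h1, by omega, h3⟩

set_option maxHeartbeats 1000000 in
lemma pvB_iff (s : String) : repeating_pair_alt s = true ↔ pvP s.toList := by
  unfold repeating_pair_alt
  rw [List.any_eq_true]
  constructor
  · rintro ⟨x, hx, hf⟩
    rw [PySem.List.mem_pyRange_one] at hx
    obtain ⟨hx0, hx1⟩ := hx
    obtain ⟨k, rfl⟩ := Int.eq_ofNat_of_zero_le hx0
    have hk : k + 1 < s.toList.length := by
      simp only [PySem.Str.len_eq] at hx1
      omega
    have hiff := PySem.Chars.exists_prefix_drop_iff_isIn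
      (s := (PySem.Str.slice s (some ((k : Int) + 2)) none).toList)
      (sub := (PySem.Str.slice s (some (k : Int)) (some ((k : Int) + 2))).toList)
    rw [PySem.Str.isIn_eq] at hf
    obtain ⟨j, hj⟩ := hiff.mpr (by simpa using hf)
    have hsub : (PySem.Str.slice s (some (k : Int)) (some ((k : Int) + 2))).toList
        = pvBg s.toList k := by
      rw [PySem.Str.toList_slice, PySem.Chars.slice_eq_listSlice, pvSlice_bg]
    have hbig : (PySem.Str.slice s (some ((k : Int) + 2)) none).toList
        = s.toList.drop (k + 2) := by
      rw [PySem.Str.toList_slice, PySem.Chars.slice_eq_listSlice]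
      have h2 : ((k : Int) + 2) = (((k + 2 : Nat)) : Int) := by push_cast; ring
      rw [h2, PySem.List.slice_from_natCast]
    rw [hsub, hbig, List.drop_drop] at hj
    have heq : pvBg s.toList (k + 2 + j) = pvBg s.toList k :=
      (pvBg_prefix_drop hk).mp hj
    exact ⟨k, k + 2 + j, by omega, pvBg_len_lt hk heq.symm, heq.symm⟩
  · rintro ⟨i, j, h1, h2, h3⟩
    have hi : i + 1 < s.toList.length := by omega
    refine ⟨(i : Int), ?_, ?_⟩
    · rw [PySem.List.mem_pyRange_one]
      constructor
      · omega
      · simp only [PySem.Str.len_eq]; omega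
    · rw [PySem.Str.isIn_eq]
      have hsub : (PySem.Str.slice s (some (i : Int)) (some ((i : Int) + 2))).toList
          = pvBg s.toList i := by
        rw [PySem.Str.toList_slice, PySem.Chars.slice_eq_listSlice, pvSlice_bg]
      have hbig : (PySem.Str.slice s (some ((i : Int) + 2)) none).toList
          = s.toList.drop (i + 2) := by
        rw [PySem.Str.toList_slice, PySem.Chars.slice_eq_listSlice]
        have h2 : ((i : Int) + 2) = (((i + 2 : Nat)) : Int) := by push_cast; ring
        rw [h2, PySem.List.slice_from_natCast]
      rw [hsub, hbig]
      refine (PySem.Chars.exists_prefix_drop_iff_isIn _ _).mp ⟨j - (i + 2), ?_⟩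
      have hj : (s.toList.drop (i + 2)).drop (j - (i + 2)) = s.toList.drop j := by
        rw [List.drop_drop]; congr 1; omega
      rw [hj]
      exact (pvBg_prefix_drop hi).mpr h3.symm

-- ===== VERDICT (by name: the statement is the Claim_ definition above) =====
theorem repeating_pair_spec : Claim_equal_repeating_pair := by
  intro s _
  unfold Spec_repeating_pair
  have hA := pvA_iff s
  have hB := pvB_iff s
  cases hA' : repeating_pair s <;> cases hB' : repeating_pair_alt s <;> simp_all
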